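-- pv_equiv track=rewrite | github.com/tigju/cs-module-project-hash-tables | applications/expensive_seq/expensive_seq.py | expensive_seq
-- ===== SOURCE A (Python) =====
-- my_dict = {}
--
-- def expensive_seq(x, y, z):
--     # Your code here
--     my_dict.update({(0,0,0) : 0})
--     if x <=0:
--         return y+z
--     if x > 0:
--         if (x,y,z) in my_dict:
--             return my_dict[(x,y,z)]
--
--         my_dict[(x,y,z)] = expensive_seq(x-1, y+1, z) + expensive_seq(x-2, y+2, z*2) + expensive_seq(x-3, y+3, z*3)
--         return my_dict[(x, y, z)]
-- ===== SOURCE B (Python) =====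
-- def expensive_seq(x, y, z):
--     # f(x, y, z) is affine in y and z: f = p + q*y + r*z where (p, q, r)
--     # depends only on x and follows a linear 3-term recurrence.
--     if x <= 0:
--         return y + z
--     t1 = t2 = t3 = (0, 1, 1)   # coefficients for x-1, x-2, x-3 (all <= 0 at start)
--     for _ in range(x):
--         t = (t1[0] + t2[0] + t3[0] + t1[1] + 2 * t2[1] + 3 * t3[1],
--              t1[1] + t2[1] + t3[1],
--              t1[2] + 2 * t2[2] + 3 * t3[2])
--         t1, t2, t3 = t, t1, t2
--     p, q, r = t1
--     return p + q * y + r * z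
-- ===== Notes on version B (the rewrite author's own statement) =====
-- stated objective: faster
-- what changed: Replaced the globally-memoized three-way recursion by a non-recursive linear loop: f(x,y,z) is affine in y and z, so B iterates a 3-term recurrence on the coefficient triples (p,q,r) and returns p+q*y+r*z; B also drops A's module-level cache side effect (return value unaffected).
import Mathlib
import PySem

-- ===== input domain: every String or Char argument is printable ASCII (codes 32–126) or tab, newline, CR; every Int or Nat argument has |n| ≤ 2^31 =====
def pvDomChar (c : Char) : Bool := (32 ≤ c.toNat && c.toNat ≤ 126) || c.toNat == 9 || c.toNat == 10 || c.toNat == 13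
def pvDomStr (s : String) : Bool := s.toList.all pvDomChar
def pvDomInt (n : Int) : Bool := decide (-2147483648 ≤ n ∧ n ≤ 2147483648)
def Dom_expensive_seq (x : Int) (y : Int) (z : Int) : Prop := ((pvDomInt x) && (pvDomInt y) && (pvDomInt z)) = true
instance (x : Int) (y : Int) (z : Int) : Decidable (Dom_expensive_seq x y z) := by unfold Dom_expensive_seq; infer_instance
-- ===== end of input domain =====

-- B replaces A's globally-memoized recursion by a non-recursive linear loop on coefficient
-- triples (f is affine in y and z); B does not populate A's module-level cache `my_dict` —
-- that mutation is a side effect only, and the equivalence proved here is about the return value.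

-- ===== PORT A =====
-- A's global dict is threaded through the recursion as explicit state (it starts empty at module
-- load; caching never changes the computed value, which the lemmas below prove).
def expensive_seq_go (x y z : Int) (d : Std.HashMap (Int × Int × Int) Int) :
    Std.HashMap (Int × Int × Int) Int × Int :=
  -- my_dict.update({(0,0,0) : 0})
  let d0 := d.insert (0, 0, 0) 0
  if _h : x ≤ 0 then (d0, y + z)
  else
    match d0[(x, y, z)]? with
    | some v => (d0, v)
    | none =>
      let r1 := expensive_seq_go (x - 1) (y + 1) z d0
      let r2 := expensive_seq_go (x - 2) (y + 2) (z * 2) r1.1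
      let r3 := expensive_seq_go (x - 3) (y + 3) (z * 3) r2.1
      let d4 := r3.1.insert (x, y, z) (r1.2 + r2.2 + r3.2)
      -- return my_dict[(x, y, z)]  (the key was just inserted, so KeyError is impossible;
      -- .getD 0 is only a type-level default for the unreachable none case)
      (d4, d4[(x, y, z)]?.getD 0)
termination_by x.toNat
decreasing_by all_goals omega

def expensive_seq (x : Int) (y : Int) (z : Int) : Int :=
  (expensive_seq_go x y z Std.HashMap.emptyWithCapacity).2

-- ===== PORT B =====
-- One loop iteration of Source B: state is the coefficient triples (t1, t2, t3).
def pvStepB (s : (Int × Int × Int) × (Int × Int × Int) × (Int × Int × Int)) :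
    (Int × Int × Int) × (Int × Int × Int) × (Int × Int × Int) :=
  let t1 := s.1; let t2 := s.2.1; let t3 := s.2.2
  ((t1.1 + t2.1 + t3.1 + t1.2.1 + 2 * t2.2.1 + 3 * t3.2.1,
    t1.2.1 + t2.2.1 + t3.2.1,
    t1.2.2 + 2 * t2.2.2 + 3 * t3.2.2), t1, t2)

def expensive_seq_alt (x : Int) (y : Int) (z : Int) : Int :=
  if x ≤ 0 then y + z
  else
    let s := (PySem.List.pyRange 0 x 1).foldl (fun s _ => pvStepB s)
      (((0, 1, 1), (0, 1, 1), (0, 1, 1)))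
    s.1.1 + s.1.2.1 * y + s.1.2.2 * z

-- ===== PRECONDITION & SPEC =====
-- Pre_ excludes the inputs on which A raises RecursionError: A recurses to depth x + 1, so for x
-- around CPython's default recursion limit (1000) it raises; x ≤ 900 leaves a stack-depth margin,
-- excluding a narrow band (~901..960, depending on the caller's stack) on which A still returns.
def Pre_expensive_seq (x : Int) (y : Int) (z : Int) : Prop := x ≤ 900
instance (x : Int) (y : Int) (z : Int) : Decidable (Pre_expensive_seq x y z) := by unfold Pre_expensive_seq; infer_instance
def pvWitness_expensive_seq : Int × Int × Int := (5, 2, 3)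

def Spec_expensive_seq (x : Int) (y : Int) (z : Int) (out : Int) : Prop := out = expensive_seq_alt x y z
instance (x : Int) (y : Int) (z : Int) (out : Int) : Decidable (Spec_expensive_seq x y z out) := by unfold Spec_expensive_seq; infer_instance

-- ===== CLAIM (what is proved, stated in full; the proofs are below) =====
def Claim_equal_expensive_seq : Prop := ∀ (x : Int) (y : Int) (z : Int), Dom_expensive_seq x y z → Pre_expensive_seq x y z → Spec_expensive_seq x y z (expensive_seq x y z)

-- ===== LEMMAS AND PROOFS =====

-- The bare recurrence both programs compute.
def naiveSeq (x y z : Int) : Int :=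
  if x ≤ 0 then y + z
  else
    naiveSeq (x - 1) (y + 1) z + naiveSeq (x - 2) (y + 2) (z * 2)
      + naiveSeq (x - 3) (y + 3) (z * 3)
termination_by x.toNat
decreasing_by all_goals omega

-- ---- A = naiveSeq: the memo dict only ever stores correct values ----
def MemoOK (d : Std.HashMap (Int × Int × Int) Int) : Prop :=
  ∀ (k : Int × Int × Int) (v : Int), d[k]? = some v → v = naiveSeq k.1 k.2.1 k.2.2

theorem memoOK_empty : MemoOK Std.HashMap.emptyWithCapacity := by
  intro k v h; simp at h

theorem memoOK_insert (d : Std.HashMap (Int × Int × Int) Int) (k : Int × Int × Int) (v : Int)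
    (hd : MemoOK d) (hv : v = naiveSeq k.1 k.2.1 k.2.2) :
    MemoOK (d.insert k v) := by
  intro k' v' h
  rw [Std.HashMap.getElem?_insert] at h
  split at h
  · rename_i heq; cases h; exact (beq_iff_eq.mp heq) ▸ hv
  · exact hd k' v' h

theorem expensive_seq_go_correct (x y z : Int) (d : Std.HashMap (Int × Int × Int) Int)
    (hd : MemoOK d) :
    MemoOK (expensive_seq_go x y z d).1 ∧
      (expensive_seq_go x y z d).2 = naiveSeq x y z := by
  rw [expensive_seq_go]
  have hd0 : MemoOK (d.insert (0, 0, 0) 0) :=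
    memoOK_insert d (0, 0, 0) 0 hd (by rw [naiveSeq]; simp)
  by_cases h : x ≤ 0
  · simp only [h, dite_true]
    exact ⟨hd0, by rw [naiveSeq]; simp [h]⟩
  · simp only [h, dite_false]
    cases hget : (d.insert (0, 0, 0) 0)[(x, y, z)]? with
    | some v =>
      exact ⟨hd0, hd0 (x, y, z) v hget⟩
    | none =>
      have h1 := expensive_seq_go_correct (x - 1) (y + 1) z _ hd0
      set d1 := (expensive_seq_go (x - 1) (y + 1) z (d.insert (0, 0, 0) 0)).1 with hd1
      have h2 := expensive_seq_go_correct (x - 2) (y + 2) (z * 2) d1 h1.1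
      set d2 := (expensive_seq_go (x - 2) (y + 2) (z * 2) d1).1 with hd2
      have h3 := expensive_seq_go_correct (x - 3) (y + 3) (z * 3) d2 h2.1
      have hsum : (expensive_seq_go (x - 1) (y + 1) z (d.insert (0, 0, 0) 0)).2
          + (expensive_seq_go (x - 2) (y + 2) (z * 2) d1).2
          + (expensive_seq_go (x - 3) (y + 3) (z * 3) d2).2 = naiveSeq x y z := by
        rw [h1.2, h2.2, h3.2]; conv_rhs => rw [naiveSeq]
        simp [h]
      refine ⟨memoOK_insert _ (x, y, z) _ h3.1 hsum, ?_⟩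
      rw [Std.HashMap.getElem?_insert_self]
      simpa using hsum
termination_by x.toNat
decreasing_by all_goals omega

theorem expensive_seq_eq_naive (x y z : Int) : expensive_seq x y z = naiveSeq x y z :=
  (expensive_seq_go_correct x y z Std.HashMap.emptyWithCapacity memoOK_empty).2

-- ---- B = naiveSeq: the loop state codes naiveSeq as an affine function of (y, z) ----
def tripVal (t : Int × Int × Int) (y z : Int) : Int := t.1 + t.2.1 * y + t.2.2 * z

theorem pvStepB_iterate_inv (k : Nat) :
    (∀ y z, tripVal (pvStepB^[k] ((0, 1, 1), (0, 1, 1), (0, 1, 1))).1 y z = naiveSeq k y z) ∧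
    (∀ y z, tripVal (pvStepB^[k] ((0, 1, 1), (0, 1, 1), (0, 1, 1))).2.1 y z
        = naiveSeq ((k : Int) - 1) y z) ∧
    (∀ y z, tripVal (pvStepB^[k] ((0, 1, 1), (0, 1, 1), (0, 1, 1))).2.2 y z
        = naiveSeq ((k : Int) - 2) y z) := by
  induction k with
  | zero =>
    refine ⟨fun y z => ?_, fun y z => ?_, fun y z => ?_⟩ <;>
      (rw [naiveSeq]; simp [tripVal])
  | succ k ih =>
    obtain ⟨ih1, ih2, ih3⟩ := ih
    rw [Function.iterate_succ_apply']
    set s := pvStepB^[k] ((0, 1, 1), (0, 1, 1), (0, 1, 1)) with hs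
    refine ⟨fun y z => ?_, fun y z => ?_, fun y z => ?_⟩
    · have e1 := ih1 (y + 1) z
      have e2 := ih2 (y + 2) (z * 2)
      have e3 := ih3 (y + 3) (z * 3)
      have hx : ¬ ((k : Int) + 1 ≤ 0) := by omega
      conv_rhs => rw [show ((k + 1 : Nat) : Int) = (k : Int) + 1 by push_cast; ring, naiveSeq]
      simp only [hx, if_false]
      rw [show (k : Int) + 1 - 1 = (k : Int) by ring,
          show (k : Int) + 1 - 2 = (k : Int) - 1 by ring,
          show (k : Int) + 1 - 3 = (k : Int) - 2 by ring, ← e1, ← e2, ← e3]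
      simp only [tripVal, pvStepB]; ring
    · rw [show ((k + 1 : Nat) : Int) - 1 = (k : Int) by push_cast; ring, ← ih1 y z]
      simp only [tripVal, pvStepB]
    · rw [show ((k + 1 : Nat) : Int) - 2 = (k : Int) - 1 by push_cast; ring, ← ih2 y z]
      simp only [tripVal, pvStepB]

theorem foldl_const_eq_iterate (l : List Int)
    (s : (Int × Int × Int) × (Int × Int × Int) × (Int × Int × Int)) :
    l.foldl (fun s _ => pvStepB s) s = pvStepB^[l.length] s := by
  induction l generalizing s with
  | nil => rfl
  | cons a t ih => simp [List.foldl_cons, ih, Function.iterate_succ_apply]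

theorem expensive_seq_alt_eq_naive (x y z : Int) : expensive_seq_alt x y z = naiveSeq x y z := by
  rw [expensive_seq_alt]
  by_cases h : x ≤ 0
  · rw [naiveSeq]; simp [h]
  · simp only [h, if_false]
    rw [foldl_const_eq_iterate, PySem.List.length_pyRange_one]
    have hx : ((x.toNat : Int)) = x := by omega
    have := (pvStepB_iterate_inv ((x - 0).toNat)).1 y z
    simp only [tripVal] at this
    rw [show (x - 0).toNat = x.toNat by omega] at this ⊢
    rw [this, hx]

-- ===== VERDICT (by name: the statement is the Claim_ definition above) =====
theorem expensive_seq_spec : Claim_equal_expensive_seq := by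
  intro x y z _ _
  unfold Spec_expensive_seq
  rw [expensive_seq_eq_naive, expensive_seq_alt_eq_naive]
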